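-- pv_equiv track=rewrite | github.com/solsteace/pugo | src/BlockMarkdown.py | get_block_type
-- ===== SOURCE A (Python) =====
-- PRECEDING_PATTERNS = {
--     "###### ": "heading_6",
--     "##### ": "heading_5",
--     "#### ": "heading_4",
--     "### ": "heading_3",
--     "## ": "heading_2",
--     "# ": "heading_1",
--     "```": "block_code",
--     "1. ": "ordered_list",
--     "> ": "block_quote",
--     "* ": "unordered_list",
--     "- ": "unordered_list",
-- }
--
-- def get_block_type(block):
--     block_type = "paragraph"
--     patterns = PRECEDING_PATTERNS.keys()
--     for pattern in patterns:
--         if pattern == block[:len(pattern)]: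
--             block_type = PRECEDING_PATTERNS[pattern]
--             break
--
--     return block_type
-- ===== SOURCE B (Python) =====
-- def get_block_type(block):
--     i = 0
--     while i < len(block) and block[i] == '#':
--         i += 1
--     if 1 <= i <= 6 and block[i:i+1] == ' ':
--         return f"heading_{i}"
--     if block.startswith("```"):
--         return "block_code"
--     if block.startswith("1. "):
--         return "ordered_list"
--     if block.startswith("> "):
--         return "block_quote"
--     if block.startswith("* ") or block.startswith("- "):
--         return "unordered_list"
--     return "paragraph"
-- ===== Notes on version B (the rewrite author's own statement) =====
-- stated objective: alternative
-- what changed: B parses the leading '#' run with one counting loop and builds the heading name from the count, then checks the five remaining prefixes with startswith, instead of A's scan over an 11-entry pattern table with slice comparisons.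
import Mathlib
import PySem

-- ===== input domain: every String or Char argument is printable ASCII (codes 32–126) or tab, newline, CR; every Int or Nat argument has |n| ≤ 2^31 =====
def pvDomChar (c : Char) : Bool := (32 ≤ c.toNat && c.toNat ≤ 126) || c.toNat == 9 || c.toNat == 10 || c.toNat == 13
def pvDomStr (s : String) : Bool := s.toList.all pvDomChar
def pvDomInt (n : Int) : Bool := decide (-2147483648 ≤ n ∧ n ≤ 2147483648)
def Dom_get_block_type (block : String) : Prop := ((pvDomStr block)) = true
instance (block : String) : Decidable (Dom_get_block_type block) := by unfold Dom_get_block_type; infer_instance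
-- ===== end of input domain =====

-- B replaces A's scan over the 11-entry pattern table by counting the leading '#' run
-- (building the heading name from the count) plus startswith checks for the 5 other prefixes;
-- alternative decomposition, same cost.

-- ===== PORT A =====
-- PRECEDING_PATTERNS, in dict insertion order (pattern, block type)
def pvPatterns : List (List Char × String) :=
  [("###### ".toList, "heading_6"), ("##### ".toList, "heading_5"),
   ("#### ".toList, "heading_4"), ("### ".toList, "heading_3"),
   ("## ".toList, "heading_2"), ("# ".toList, "heading_1"),
   ("```".toList, "block_code"), ("1. ".toList, "ordered_list"),
   ("> ".toList, "block_quote"), ("* ".toList, "unordered_list"),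
   ("- ".toList, "unordered_list")]

-- A's for-loop with break: first pattern with pattern == block[:len(pattern)] wins, else "paragraph"
def pvLoopA : List (List Char × String) → List Char → String
  | [], _ => "paragraph"
  | (p, t) :: rest, cs =>
      if p = PySem.Chars.slice cs none (some (PySem.Chars.len p)) then t
      else pvLoopA rest cs

def get_block_type (block : String) : String := pvLoopA pvPatterns block.toList

-- ===== PORT B =====
-- while i < len(block) and block[i] == '#': i += 1
def pvCountHash : List Char → Nat
  | c :: rest => if c = '#' then pvCountHash rest + 1 else 0
  | [] => 0

def get_block_type_alt (block : String) : String :=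
  let cs := block.toList
  let i := pvCountHash cs
  if 1 ≤ i ∧ i ≤ 6 ∧ PySem.Chars.slice cs (some (i : Int)) (some ((i : Int) + 1)) = [' '] then
    String.ofList ("heading_".toList ++ PySem.Int.toChars (i : Int))
  else if PySem.Chars.startswith cs "```".toList then "block_code"
  else if PySem.Chars.startswith cs "1. ".toList then "ordered_list"
  else if PySem.Chars.startswith cs "> ".toList then "block_quote"
  else if PySem.Chars.startswith cs "* ".toList || PySem.Chars.startswith cs "- ".toList then
    "unordered_list"
  else "paragraph"

-- ===== PRECONDITION & SPEC =====
def Spec_get_block_type (block : String) (out : String) : Prop := out = get_block_type_alt block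
instance (block : String) (out : String) : Decidable (Spec_get_block_type block out) := by unfold Spec_get_block_type; infer_instance

-- ===== CLAIM (what is proved, stated in full; the proofs are below) =====
def Claim_equal_get_block_type : Prop := ∀ (block : String), Dom_get_block_type block → Spec_get_block_type block (get_block_type block)

-- ===== LEMMAS AND PROOFS =====

-- A heading pattern of k '#'s plus a space is a prefix of cs iff the leading-'#' run has
-- length exactly k and the next character is a space.
theorem pv_hp_prefix (k : Nat) (cs : List Char) :
    (List.replicate k '#' ++ [' ']) <+: cs ↔
      pvCountHash cs = k ∧ (cs.drop k).take 1 = [' '] := by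
  induction k generalizing cs with
  | zero =>
      cases cs with
      | nil => simp [pvCountHash]
      | cons c t =>
          simp only [List.replicate, List.nil_append, List.drop_zero]
          constructor
          · intro hpre
            rcases List.cons_prefix_cons.mp hpre with ⟨rfl, -⟩
            simp [pvCountHash]
          · rintro ⟨-, h2⟩
            have hc : c = ' ' := by simpa using h2
            subst hc
            simp [List.cons_prefix_cons]
  | succ k ih =>
      cases cs with
      | nil => simp [pvCountHash]
      | cons c t =>
          rw [List.replicate_succ]
          by_cases hc : c = '#'
          · subst hc
            simp [List.cons_prefix_cons, pvCountHash, ih]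
          · simp [List.cons_prefix_cons, pvCountHash, hc, Ne.symm hc]

-- A's slice-equality test is exactly the prefix test.
theorem pv_condA (p cs : List Char) :
    (p = PySem.Chars.slice cs none (some (PySem.Chars.len p))) ↔ p <+: cs := by
  simp [PySem.Chars.len]
  rw [List.prefix_iff_eq_take]

theorem pv_main (cs : List Char) :
    pvLoopA pvPatterns cs =
      (if 1 ≤ pvCountHash cs ∧ pvCountHash cs ≤ 6 ∧
          PySem.Chars.slice cs (some (pvCountHash cs : Int)) (some ((pvCountHash cs : Int) + 1)) = [' '] then
         String.ofList ("heading_".toList ++ PySem.Int.toChars (pvCountHash cs : Int))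
       else if PySem.Chars.startswith cs "```".toList then "block_code"
       else if PySem.Chars.startswith cs "1. ".toList then "ordered_list"
       else if PySem.Chars.startswith cs "> ".toList then "block_quote"
       else if PySem.Chars.startswith cs "* ".toList || PySem.Chars.startswith cs "- ".toList then
         "unordered_list"
       else "paragraph") := by
  have hslice : ∀ i : Nat,
      PySem.Chars.slice cs (some (i : Int)) (some ((i : Int) + 1)) = (cs.drop i).take 1 := by
    intro i
    simpa using PySem.List.slice_natCast_add (xs := cs) (j := i) (n := 1)
  rw [hslice]
  by_cases hH : 1 ≤ pvCountHash cs ∧ pvCountHash cs ≤ 6 ∧ (cs.drop (pvCountHash cs)).take 1 = [' ']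
  · obtain ⟨h1, h6, hsp⟩ := hH
    rw [if_pos ⟨h1, h6, hsp⟩]
    simp only [pvLoopA, pvPatterns, pv_condA,
      show "###### ".toList = List.replicate 6 '#' ++ [' '] from by decide,
      show "##### ".toList = List.replicate 5 '#' ++ [' '] from by decide,
      show "#### ".toList = List.replicate 4 '#' ++ [' '] from by decide,
      show "### ".toList = List.replicate 3 '#' ++ [' '] from by decide,
      show "## ".toList = List.replicate 2 '#' ++ [' '] from by decide,
      show "# ".toList = List.replicate 1 '#' ++ [' '] from by decide,
      pv_hp_prefix]
    interval_cases h : pvCountHash cs <;> simp_all <;> decide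
  · have hno : ∀ k : Nat, 1 ≤ k → k ≤ 6 → ¬ (List.replicate k '#' ++ [' ']) <+: cs := by
      intro k hk1 hk6 hpre
      rcases (pv_hp_prefix k cs).mp hpre with ⟨hc, hs⟩
      exact hH ⟨by omega, by omega, by rw [hc]; exact hs⟩
    have h6' : ¬ ("###### ".toList <+: cs) := by
      rw [show "###### ".toList = List.replicate 6 '#' ++ [' '] from by decide]
      exact hno 6 (by omega) (by omega)
    have h5' : ¬ ("##### ".toList <+: cs) := by
      rw [show "##### ".toList = List.replicate 5 '#' ++ [' '] from by decide]
      exact hno 5 (by omega) (by omega)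
    have h4' : ¬ ("#### ".toList <+: cs) := by
      rw [show "#### ".toList = List.replicate 4 '#' ++ [' '] from by decide]
      exact hno 4 (by omega) (by omega)
    have h3' : ¬ ("### ".toList <+: cs) := by
      rw [show "### ".toList = List.replicate 3 '#' ++ [' '] from by decide]
      exact hno 3 (by omega) (by omega)
    have h2' : ¬ ("## ".toList <+: cs) := by
      rw [show "## ".toList = List.replicate 2 '#' ++ [' '] from by decide]
      exact hno 2 (by omega) (by omega)
    have h1' : ¬ ("# ".toList <+: cs) := by
      rw [show "# ".toList = List.replicate 1 '#' ++ [' '] from by decide]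
      exact hno 1 (by omega) (by omega)
    rw [if_neg hH]
    simp only [pvLoopA, pvPatterns, pv_condA, h6', h5', h4', h3', h2', h1', if_false,
      Bool.or_eq_true, PySem.Chars.startswith_iff]
    split_ifs <;> simp_all [PySem.Chars.startswith_iff]

-- ===== VERDICT (by name: the statement is the Claim_ definition above) =====
theorem get_block_type_spec : Claim_equal_get_block_type := by
  intro block _
  unfold Spec_get_block_type get_block_type get_block_type_alt
  exact pv_main block.toList
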